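-- pv_equiv track=rewrite | github.com/AbhangPaturkar2023BIT508/Python_Programs | Practical/change_case.py | convert_to_zigzag_case
-- ===== SOURCE A (Python) =====
-- def convert_to_capital_case(text):
-- 	cap_text = ''
-- 	for letter in text:
-- 		unicode_val = ord(letter)
-- 		if unicode_val >= 97 and unicode_val <= 122:
-- 			cap_text += chr(unicode_val - 32)
-- 		else:
-- 			cap_text += letter
-- 	return cap_text
--
-- def convert_to_small_case(text):
-- 	small_text = ''
-- 	for letter in text:
-- 		unicode_val = ord(letter)
-- 		if unicode_val >= 65 and unicode_val <= 90:
-- 			small_text += chr(unicode_val + 32)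
-- 		else:
-- 			small_text += letter
-- 	return small_text
--
-- def convert_to_zigzag_case(text):
-- 	zigzag_text = ''
-- 	flag = ord(text[0]) in range(65, 91)
-- 	for letter in text:
-- 		if flag:
-- 			zigzag_text += convert_to_capital_case(letter)
-- 			flag = not flag
-- 		elif not flag:
-- 			zigzag_text += convert_to_small_case(letter)
-- 			flag = not flag
-- 		else:
-- 			zigzag_text += letter
-- 	return zigzag_text
-- ===== SOURCE B (Python) =====
-- def convert_to_zigzag_case(text):
--     flag = ord(text[0]) in range(65, 91)
--     upper = [chr(ord(c) - 32) if 97 <= ord(c) <= 122 else c for c in text]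
--     lower = [chr(ord(c) + 32) if 65 <= ord(c) <= 90 else c for c in text]
--     return ''.join(u if (i % 2 == 0) == flag else l
--                    for i, (u, l) in enumerate(zip(upper, lower)))
-- ===== Notes on version B (the rewrite author's own statement) =====
-- stated objective: alternative
-- what changed: Replaces A's stateful toggle loop (which calls a case-conversion helper per character) by precomputing whole upper-mapped and lower-mapped copies of the string and merging them by index parity relative to the first character's case.
-- outside the precondition, e.g. on convert_to_zigzag_case(''): A raises IndexError, B raises IndexError
import Mathlib
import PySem

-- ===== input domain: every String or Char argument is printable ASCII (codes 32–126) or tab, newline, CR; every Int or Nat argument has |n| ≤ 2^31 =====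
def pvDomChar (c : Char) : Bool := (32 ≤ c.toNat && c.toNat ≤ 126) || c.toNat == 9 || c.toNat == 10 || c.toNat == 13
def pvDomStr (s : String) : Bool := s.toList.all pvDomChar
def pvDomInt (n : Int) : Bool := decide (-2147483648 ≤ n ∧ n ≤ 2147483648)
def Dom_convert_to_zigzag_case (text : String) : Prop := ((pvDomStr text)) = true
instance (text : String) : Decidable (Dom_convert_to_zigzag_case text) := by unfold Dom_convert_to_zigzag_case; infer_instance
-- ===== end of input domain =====

-- B replaces A's stateful toggle loop calling the case helpers per character by precomputing a
-- full upper-mapped and a full lower-mapped copy and merging them by index parity ('alternative').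
-- Ports build the result as a List Char accumulator (exact mirror of Python str concatenation).

-- ===== PORT A =====
def convert_to_capital_case (text : String) : String :=
  String.ofList (text.toList.foldl (fun cap_text letter =>
    let unicode_val := letter.toNat
    if 97 ≤ unicode_val ∧ unicode_val ≤ 122 then
      cap_text ++ [Char.ofNat (unicode_val - 32)]
    else cap_text ++ [letter]) [])

def convert_to_small_case (text : String) : String :=
  String.ofList (text.toList.foldl (fun small_text letter =>
    let unicode_val := letter.toNat
    if 65 ≤ unicode_val ∧ unicode_val ≤ 90 then
      small_text ++ [Char.ofNat (unicode_val + 32)]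
    else small_text ++ [letter]) [])

def zigStep (st : List Char × Bool) (letter : Char) : List Char × Bool :=
  if st.2 then (st.1 ++ (convert_to_capital_case (String.ofList [letter])).toList, !st.2)
  else (st.1 ++ (convert_to_small_case (String.ofList [letter])).toList, !st.2)

def convert_to_zigzag_case (text : String) : String :=
  match text.toList with
  | [] => ""   -- Python raises IndexError on text[0]; excluded by Pre_
  | c0 :: _ =>
    let flag := decide (65 ≤ c0.toNat ∧ c0.toNat ≤ 90)
    String.ofList (text.toList.foldl zigStep ([], flag)).1

-- ===== PORT B =====
def upChar (c : Char) : Char :=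
  if 97 ≤ c.toNat ∧ c.toNat ≤ 122 then Char.ofNat (c.toNat - 32) else c

def loChar (c : Char) : Char :=
  if 65 ≤ c.toNat ∧ c.toNat ≤ 90 then Char.ofNat (c.toNat + 32) else c

def convert_to_zigzag_case_alt (text : String) : String :=
  match text.toList with
  | [] => ""   -- Python raises IndexError on text[0]; excluded by Pre_
  | c0 :: _ =>
    let flag := decide (65 ≤ c0.toNat ∧ c0.toNat ≤ 90)
    let upper := text.toList.map upChar
    let lower := text.toList.map loChar
    String.ofList (((upper.zip lower).zipIdx).map
      (fun p => if (decide (p.2 % 2 = 0)) == flag then p.1.1 else p.1.2))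

-- ===== PRECONDITION & SPEC =====
-- Pre_ excludes only the empty string, on which A raises IndexError at text[0].
def Pre_convert_to_zigzag_case (text : String) : Prop := text ≠ ""
instance (text : String) : Decidable (Pre_convert_to_zigzag_case text) := by
  unfold Pre_convert_to_zigzag_case; infer_instance
def pvWitness_convert_to_zigzag_case : String := "Hello World"

def Spec_convert_to_zigzag_case (text : String) (out : String) : Prop := out = convert_to_zigzag_case_alt text
instance (text : String) (out : String) : Decidable (Spec_convert_to_zigzag_case text out) := by unfold Spec_convert_to_zigzag_case; infer_instance

-- ===== CLAIM (what is proved, stated in full; the proofs are below) =====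
def Claim_equal_convert_to_zigzag_case : Prop := ∀ (text : String), Dom_convert_to_zigzag_case text → Pre_convert_to_zigzag_case text → Spec_convert_to_zigzag_case text (convert_to_zigzag_case text)

-- ===== LEMMAS AND PROOFS =====

-- the alternating character list A's loop produces, described structurally
def mergeList : List Char → Bool → List Char
  | [], _ => []
  | c :: cs, f => (if f then upChar c else loChar c) :: mergeList cs (!f)

lemma upChar_single (c : Char) :
    (convert_to_capital_case (String.ofList [c])).toList = [upChar c] := by
  simp only [convert_to_capital_case, upChar, String.toList_ofList]
  split_ifs with h <;> simp [List.foldl, h]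

lemma loChar_single (c : Char) :
    (convert_to_small_case (String.ofList [c])).toList = [loChar c] := by
  simp only [convert_to_small_case, loChar, String.toList_ofList]
  split_ifs with h <;> simp [List.foldl, h]

lemma loop_eq (l : List Char) (f : Bool) (s : List Char) :
    (l.foldl zigStep (s, f)).1 = s ++ mergeList l f := by
  induction l generalizing f s with
  | nil => simp [mergeList]
  | cons c cs ih =>
    cases f <;>
      simp [List.foldl, zigStep, upChar_single, loChar_single, mergeList, ih,
        List.append_assoc]

lemma merge_zip (l : List Char) (n : Nat) (flag : Bool) :
    (((l.map upChar).zip (l.map loChar)).zipIdx n).map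
        (fun p => if (decide (p.2 % 2 = 0)) == flag then p.1.1 else p.1.2)
      = mergeList l ((decide (n % 2 = 0)) == flag) := by
  induction l generalizing n flag with
  | nil => simp [mergeList]
  | cons c cs ih =>
    have hpar : (decide ((n + 1) % 2 = 0)) = !(decide (n % 2 = 0)) := by
      rcases Nat.mod_two_eq_zero_or_one n with h | h <;> simp [Nat.add_mod, h]
    simp only [List.map_cons, List.zip_cons_cons, List.zipIdx_cons, List.map]
    rw [ih (n + 1) flag, hpar, mergeList]
    cases hd : decide (n % 2 = 0) <;> cases flag <;> simp

-- ===== VERDICT (by name: the statement is the Claim_ definition above) =====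
theorem convert_to_zigzag_case_spec : Claim_equal_convert_to_zigzag_case := by
  intro text _ hpre
  unfold Spec_convert_to_zigzag_case
  cases htl : text.toList with
  | nil => exact absurd (String.toList_eq_nil_iff.mp htl) hpre
  | cons c0 cs =>
    simp only [convert_to_zigzag_case, convert_to_zigzag_case_alt, htl]
    rw [merge_zip, loop_eq]
    simp
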